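-- pv_equiv track=rewrite | github.com/AdrianUbedaTouati/TFG-FR | IA_Meteorologica/Redes/N-BEATS/Multivariable/Corto_con_random/nuevo/nbeats_multivar.py | detect_target_col
-- ===== SOURCE A (Python) =====
-- def detect_target_col(cols):
--     ranked = []
--     for c in cols:
--         cl = str(c).lower()
--         score = 0
--         if "temp" in cl: score += 2
--         if "temperature" in cl: score += 1
--         if "_z" in cl or "norm" in cl or "normalized" in cl or "normalizado" in cl: score += 1
--         if score > 0:
--             ranked.append((score, c))
--     if ranked:
--         ranked.sort(reverse=True)
--         return ranked[0][1]
--     return None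
-- ===== SOURCE B (Python) =====
-- def detect_target_col(cols):
--     best = None
--     for c in cols:
--         cl = str(c).lower()
--         score = 0
--         if "temp" in cl: score += 2
--         if "temperature" in cl: score += 1
--         if "_z" in cl or "norm" in cl or "normalized" in cl or "normalizado" in cl: score += 1
--         if score > 0 and (best is None or (score, c) > best):
--             best = (score, c)
--     return best[1] if best is not None else None
-- ===== Notes on version B (the rewrite author's own statement) =====
-- stated objective: alternative
-- what changed: Replaced build-list-then-sort-then-take-first by a single max-tracking pass that keeps the best (score, column) tuple under Python's lexicographic tuple order.
import Mathlib
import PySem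

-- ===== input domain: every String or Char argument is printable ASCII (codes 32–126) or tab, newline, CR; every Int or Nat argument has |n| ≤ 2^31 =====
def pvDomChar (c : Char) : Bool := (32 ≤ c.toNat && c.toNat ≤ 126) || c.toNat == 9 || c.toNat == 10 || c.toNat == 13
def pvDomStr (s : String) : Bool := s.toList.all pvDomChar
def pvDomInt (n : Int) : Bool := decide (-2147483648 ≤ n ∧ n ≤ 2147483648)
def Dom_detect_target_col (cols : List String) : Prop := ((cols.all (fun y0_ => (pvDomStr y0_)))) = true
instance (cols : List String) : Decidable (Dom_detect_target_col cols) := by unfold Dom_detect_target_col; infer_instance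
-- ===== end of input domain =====

-- B replaces A's build-list / sort(reverse=True) / take-first by one max-tracking pass over cols (objective: alternative, same keyword scoring).

-- shared keyword scoring (identical code in both Python sources)
def pvScore (c : String) : Int :=
  let cl := PySem.Str.lower c
  let score : Int := 0
  let score := if PySem.Str.isIn "temp" cl then score + 2 else score
  let score := if PySem.Str.isIn "temperature" cl then score + 1 else score
  let score := if PySem.Str.isIn "_z" cl || PySem.Str.isIn "norm" cl ||
                  PySem.Str.isIn "normalized" cl || PySem.Str.isIn "normalizado" cl
               then score + 1 else score
  score

-- ===== PORT A =====
def detect_target_col (cols : List String) : Option String :=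
  let ranked := cols.foldl
    (fun acc c =>
      let score := pvScore c
      if score > 0 then acc ++ [(score, c)] else acc)
    ([] : List (Int × String))
  match PySem.List.sorted2 ranked (fun p => p.1) (fun p => p.2) true with
  | [] => none
  | (_, c) :: _ => some c

-- ===== PORT B =====
-- one step of B's loop: Python's '(score, c) > best' is lexicographic tuple comparison
def pvBStep (best : Option (Int × String)) (c : String) : Option (Int × String) :=
  let score := pvScore c
  if score > 0 &&
     (match best with
      | none => true
      | some b => decide (b.1 < score) || (b.1 == score && decide (b.2 < c)))
  then some (score, c) else best

def detect_target_col_alt (cols : List String) : Option String :=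
  (cols.foldl pvBStep none).map (fun p => p.2)

-- ===== PRECONDITION & SPEC =====
def Spec_detect_target_col (cols : List String) (out : Option String) : Prop := out = detect_target_col_alt cols
instance (cols : List String) (out : Option String) : Decidable (Spec_detect_target_col cols out) := by unfold Spec_detect_target_col; infer_instance

-- ===== CLAIM (what is proved, stated in full; the proofs are below) =====
def Claim_equal_detect_target_col : Prop := ∀ (cols : List String), Dom_detect_target_col cols → Spec_detect_target_col cols (detect_target_col cols)

-- ===== LEMMAS AND PROOFS =====

-- the comparison used by sorted2's insertion (reverse=True): element kept before the head iff head <lex new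
def pvBefore (x y : Int × String) : Bool :=
  decide (y.1 < x.1) || (!decide (x.1 < y.1) && decide (y.2 < x.2))

-- max-tracking step over already-scored pairs
def pvMStep (best : Option (Int × String)) (p : Int × String) : Option (Int × String) :=
  match best with
  | none => some p
  | some b => if pvBefore p b then some p else best

lemma pvBefore_eq_lex (b p : Int × String) :
    pvBefore p b = (decide (b.1 < p.1) || (b.1 == p.1 && decide (b.2 < p.2))) := by
  unfold pvBefore
  rcases lt_trichotomy b.1 p.1 with h | h | h
  · simp [h]
  · simp [h]
  · have h1 : ¬ b.1 < p.1 := by omega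
    have h2 : ¬ b.1 = p.1 := by omega
    simp [h, h1, h2]

lemma pvBStep_eq (best : Option (Int × String)) (c : String) :
    pvBStep best c = if pvScore c > 0 then pvMStep best (pvScore c, c) else best := by
  unfold pvBStep pvMStep
  by_cases h : pvScore c > 0
  · simp only [h, if_true]
    cases best with
    | none => simp
    | some b => simp [pvBefore_eq_lex b (pvScore c, c)]
  · simp [h]

lemma head?_insertBy (before : (Int × String) → (Int × String) → Bool) (x : Int × String)
    (ys : List (Int × String)) :
    (PySem.List.insertBy before x ys).head? =
      match ys with
      | [] => some x
      | y :: _ => if before x y then some x else some y := by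
  cases ys with
  | nil => rfl
  | cons y t =>
    simp only [PySem.List.insertBy]
    by_cases h : before x y <;> simp [h]

lemma sorted2_append_singleton (l : List (Int × String)) (x : Int × String) :
    PySem.List.sorted2 (l ++ [x]) (fun p => p.1) (fun p => p.2) true =
      PySem.List.insertBy pvBefore x
        (PySem.List.sorted2 l (fun p => p.1) (fun p => p.2) true) := by
  unfold PySem.List.sorted2 pvBefore
  simp [List.foldl_append]

lemma head_sorted2_eq_foldl (l : List (Int × String)) :
    (PySem.List.sorted2 l (fun p => p.1) (fun p => p.2) true).head? = l.foldl pvMStep none := by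
  induction l using List.reverseRecOn with
  | nil => rfl
  | append_singleton l x ih =>
    rw [sorted2_append_singleton, List.foldl_append, ← ih, head?_insertBy]
    cases hs : PySem.List.sorted2 l (fun p => p.1) (fun p => p.2) true with
    | nil => simp [pvMStep]
    | cons y t => simp [pvMStep]

lemma foldl_bstep_eq (cols : List String) (b : Option (Int × String)) :
    cols.foldl pvBStep b =
      ((cols.filter (fun c => decide (pvScore c > 0))).map (fun c => (pvScore c, c))).foldl pvMStep b := by
  induction cols generalizing b with
  | nil => rfl
  | cons c t ih =>
    simp only [List.foldl_cons, List.filter_cons]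
    by_cases h : pvScore c > 0
    · simp [h, pvBStep_eq, ih]
    · simp [h, pvBStep_eq, ih]

lemma ranked_eq (cols : List String) :
    cols.foldl
      (fun acc c =>
        let score := pvScore c
        if score > 0 then acc ++ [(score, c)] else acc)
      ([] : List (Int × String)) =
      (cols.filter (fun c => decide (pvScore c > 0))).map (fun c => (pvScore c, c)) := by
  have h := PySem.List.foldl_append_if (fun c => decide (pvScore c > 0))
      (fun c => (pvScore c, c)) cols []
  simpa using h

-- ===== VERDICT (by name: the statement is the Claim_ definition above) =====
theorem detect_target_col_spec : Claim_equal_detect_target_col := by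
  intro cols _
  unfold Spec_detect_target_col detect_target_col detect_target_col_alt
  rw [foldl_bstep_eq, ranked_eq, ← head_sorted2_eq_foldl]
  show (match PySem.List.sorted2 ((List.filter (fun c => decide (pvScore c > 0)) cols).map fun c => (pvScore c, c)) (fun p => p.1) (fun p => p.2) true with
        | [] => (none : Option String)
        | (_, c) :: _ => some c) = _
  cases hs : PySem.List.sorted2 ((List.filter (fun c => decide (pvScore c > 0)) cols).map fun c => (pvScore c, c)) (fun p => p.1) (fun p => p.2) true with
  | nil => rfl
  | cons y t => obtain ⟨s, c⟩ := y; rfl
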